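-- pv_equiv track=rewrite | github.com/18965050/python-RelaseScript | deploy/command/deploy/common.py | _getAppNameFromClsName
-- ===== SOURCE A (Python) =====
-- def _getAppNameFromClsName(clsName):
-- 	finalName = ''
-- 	for index, char in enumerate(clsName[:-10]):  # 去除最后的Executable
-- 		if char.isupper():
-- 			if index == 0:
-- 				finalName += char.lower()
-- 			else:
-- 				finalName += ('-' + char.lower())
-- 		else:
-- 			finalName += char
--
-- 	return finalName
-- ===== SOURCE B (Python) =====
-- def _getAppNameFromClsName(clsName):
-- 	segments = []
-- 	for char in clsName[:-10]:
-- 		if char.isupper() or not segments: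
-- 			segments.append([char])
-- 		else:
-- 			segments[-1].append(char)
-- 	return '-'.join(''.join(seg) for seg in segments).lower()
-- ===== Notes on version B (the rewrite author's own statement) =====
-- stated objective: alternative
-- what changed: B partitions the sliced string into word segments (a new segment at each uppercase char or at the start), then produces the result in one final dash-join followed by a single lowercasing pass, instead of A's per-character positional accumulation that lowercases and inserts dashes character by character.
import Mathlib
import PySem

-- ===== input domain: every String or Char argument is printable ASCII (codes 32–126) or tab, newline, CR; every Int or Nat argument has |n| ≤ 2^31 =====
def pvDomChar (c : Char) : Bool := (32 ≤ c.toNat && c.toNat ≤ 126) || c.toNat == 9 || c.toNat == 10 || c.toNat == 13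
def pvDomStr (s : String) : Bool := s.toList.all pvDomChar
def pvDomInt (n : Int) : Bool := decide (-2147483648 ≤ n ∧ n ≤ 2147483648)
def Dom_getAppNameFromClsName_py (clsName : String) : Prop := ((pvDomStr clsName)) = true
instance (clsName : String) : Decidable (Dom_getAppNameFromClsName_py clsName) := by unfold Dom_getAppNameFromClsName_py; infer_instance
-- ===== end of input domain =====

-- B builds the dash-separated words as segments and joins/lowercases once, instead of A's per-character accumulation; same cost, different decomposition.

-- ===== PORT A =====
-- loop body of A's 'for index, char in enumerate(clsName[:-10])'
def pvStepA (finalName : List Char) (p : Int × Char) : List Char :=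
  if PySem.Chars.isupper p.2 then
    if p.1 == 0 then finalName ++ [PySem.Chars.lowerChar p.2]
    else finalName ++ ('-' :: [PySem.Chars.lowerChar p.2])
  else finalName ++ [p.2]

def getAppNameFromClsName_py (clsName : String) : String :=
  String.ofList
    ((PySem.List.enumerate (PySem.List.slice clsName.toList none (some (-10))) 0).foldl
      pvStepA [])

-- ===== PORT B =====
-- loop body of B's 'for char in clsName[:-10]' over the list of segments (each a list of chars)
def pvStepB (segs : List (List Char)) (c : Char) : List (List Char) :=
  if PySem.Chars.isupper c || segs.isEmpty then segs ++ [[c]]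
  else segs.dropLast ++ [(segs.getLast?.getD []) ++ [c]]

def getAppNameFromClsName_py_alt (clsName : String) : String :=
  String.ofList
    (PySem.Chars.lower (PySem.Chars.join ['-']
      ((PySem.List.slice clsName.toList none (some (-10))).foldl pvStepB [])))

-- ===== PRECONDITION & SPEC =====
def Spec_getAppNameFromClsName_py (clsName : String) (out : String) : Prop := out = getAppNameFromClsName_py_alt clsName
instance (clsName : String) (out : String) : Decidable (Spec_getAppNameFromClsName_py clsName out) := by unfold Spec_getAppNameFromClsName_py; infer_instance

-- ===== CLAIM (what is proved, stated in full; the proofs are below) =====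
def Claim_equal_getAppNameFromClsName_py : Prop := ∀ (clsName : String), Dom_getAppNameFromClsName_py clsName → Spec_getAppNameFromClsName_py clsName (getAppNameFromClsName_py clsName)

-- ===== LEMMAS AND PROOFS =====

theorem pvLowerChar_of_not_upper (c : Char) (h : PySem.Chars.isupper c = false) :
    PySem.Chars.lowerChar c = c := by
  simp [PySem.Chars.lowerChar, h]

theorem pvJoin_cons_of_ne_nil (sep : List Char) (a : List Char) (t : List (List Char))
    (h : t ≠ []) :
    PySem.Chars.join sep (a :: t) = a ++ sep ++ PySem.Chars.join sep t := by
  cases t with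
  | nil => exact absurd rfl h
  | cons b l => simp [PySem.Chars.join_cons_cons]

theorem pvJoin_append_singleton (sep : List Char) (segs : List (List Char)) (y : List Char)
    (h : segs ≠ []) :
    PySem.Chars.join sep (segs ++ [y]) = PySem.Chars.join sep segs ++ sep ++ y := by
  induction segs with
  | nil => exact absurd rfl h
  | cons a l ih =>
    cases l with
    | nil => simp [PySem.Chars.join, List.intercalate]
    | cons b l' =>
      rw [pvJoin_cons_of_ne_nil _ _ _ (by simp), List.cons_append,
        pvJoin_cons_of_ne_nil _ _ _ (by simp), ih (by simp)]
      simp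

theorem pvJoin_update_last (sep : List Char) (segs : List (List Char)) (c : Char)
    (h : segs ≠ []) :
    PySem.Chars.join sep (segs.dropLast ++ [(segs.getLast?.getD []) ++ [c]])
      = PySem.Chars.join sep segs ++ [c] := by
  induction segs with
  | nil => exact absurd rfl h
  | cons a l ih =>
    cases l with
    | nil => simp [PySem.Chars.join, List.intercalate]
    | cons b l' =>
      rw [List.dropLast_cons_of_ne_nil (by simp : b :: l' ≠ []), List.getLast?_cons_cons,
        List.cons_append, pvJoin_cons_of_ne_nil _ _ _ (by simp),
        pvJoin_cons_of_ne_nil _ _ _ (by simp), ih (by simp)]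
      simp

theorem pvLoop_eq (cs : List Char) :
    ∀ (s : Int), 1 ≤ s → ∀ (segs : List (List Char)), segs ≠ [] →
    (PySem.List.enumerate cs s).foldl pvStepA
        (PySem.Chars.lower (PySem.Chars.join ['-'] segs))
      = PySem.Chars.lower (PySem.Chars.join ['-'] (cs.foldl pvStepB segs)) := by
  induction cs with
  | nil => intro s hs segs hsegs; simp [PySem.List.enumerate_nil]
  | cons c cs ih =>
    intro s hs segs hsegs
    rw [PySem.List.enumerate_cons]
    have hs0 : (s == 0) = false := by simp; omega
    by_cases hu : PySem.Chars.isupper c = true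
    · have hA : pvStepA (PySem.Chars.lower (PySem.Chars.join ['-'] segs)) (s, c)
          = PySem.Chars.lower (PySem.Chars.join ['-'] (segs ++ [[c]])) := by
        rw [pvJoin_append_singleton _ _ _ hsegs]
        simp [pvStepA, hu, hs0, PySem.Chars.lower,
          pvLowerChar_of_not_upper '-' (by decide)]
      have hB : pvStepB segs c = segs ++ [[c]] := by simp [pvStepB, hu]
      simp only [List.foldl_cons, hA, hB]
      exact ih (s + 1) (by omega) (segs ++ [[c]]) (by simp)
    · have hu' : PySem.Chars.isupper c = false := by simpa using hu
      have hA : pvStepA (PySem.Chars.lower (PySem.Chars.join ['-'] segs)) (s, c)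
          = PySem.Chars.lower (PySem.Chars.join ['-'] (pvStepB segs c)) := by
        simp [pvStepA, pvStepB, hu', List.isEmpty_iff, hsegs,
          pvJoin_update_last _ _ _ hsegs, PySem.Chars.lower,
          pvLowerChar_of_not_upper c hu']
      simp only [List.foldl_cons, hA]
      exact ih (s + 1) (by omega) (pvStepB segs c)
        (by simp [pvStepB, hu', List.isEmpty_iff, hsegs])

-- ===== VERDICT (by name: the statement is the Claim_ definition above) =====
theorem getAppNameFromClsName_py_spec : Claim_equal_getAppNameFromClsName_py := by
  unfold Claim_equal_getAppNameFromClsName_py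
  intro clsName _
  unfold Spec_getAppNameFromClsName_py getAppNameFromClsName_py getAppNameFromClsName_py_alt
  cases hcs : PySem.List.slice clsName.toList none (some (-10)) with
  | nil => simp [PySem.List.enumerate_nil, PySem.Chars.join, List.intercalate, PySem.Chars.lower]
  | cons c rest =>
    rw [PySem.List.enumerate_cons]
    have hfirst : pvStepA [] ((0 : Int), c)
        = PySem.Chars.lower (PySem.Chars.join ['-'] [[c]]) := by
      by_cases hu : PySem.Chars.isupper c = true
      · simp [pvStepA, hu, PySem.Chars.join, List.intercalate, PySem.Chars.lower]
      · have hu' : PySem.Chars.isupper c = false := by simpa using hu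
        simp [pvStepA, hu', PySem.Chars.join, List.intercalate, PySem.Chars.lower,
          pvLowerChar_of_not_upper c hu']
    have hB : pvStepB [] c = [[c]] := by simp [pvStepB]
    simp only [List.foldl_cons, hfirst, hB, zero_add]
    rw [pvLoop_eq rest 1 (by omega) [[c]] (by simp)]
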